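-- pv_equiv track=rewrite | github.com/AkramHussainChoudhury/Data_Structuer_and_Algorithm | Arrays/Array1/specail_seq_AG.py | solve
-- ===== SOURCE A (Python) =====
-- def solve(A):
--     total=0
--     countA=0
--     for i in A:
--         if i=='A':
--             countA+=1
--         if i=='G':
--             total=(total + countA)%1000000007
--
--
--     return total%1000000007
-- ===== SOURCE B (Python) =====
-- def solve(A):
--     # pass 1: prefix counts of 'A' up to and including each position
--     pref = []
--     c = 0
--     for ch in A:
--         if ch == 'A':
--             c += 1
--         pref.append(c)
--     # pass 2: sum the prefix count at every 'G', single mod at the end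
--     total = 0
--     for p, ch in zip(pref, A):
--         if ch == 'G':
--             total += p
--     return total % 1000000007
-- ===== Notes on version B (the rewrite author's own statement) =====
-- stated objective: alternative
-- what changed: Replaces the single-pass dual-counter loop with mod at every 'G' by a two-pass decomposition: first build a prefix-count list of 'A's, then sum that list's entries at 'G' positions and take one final mod.
import Mathlib
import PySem

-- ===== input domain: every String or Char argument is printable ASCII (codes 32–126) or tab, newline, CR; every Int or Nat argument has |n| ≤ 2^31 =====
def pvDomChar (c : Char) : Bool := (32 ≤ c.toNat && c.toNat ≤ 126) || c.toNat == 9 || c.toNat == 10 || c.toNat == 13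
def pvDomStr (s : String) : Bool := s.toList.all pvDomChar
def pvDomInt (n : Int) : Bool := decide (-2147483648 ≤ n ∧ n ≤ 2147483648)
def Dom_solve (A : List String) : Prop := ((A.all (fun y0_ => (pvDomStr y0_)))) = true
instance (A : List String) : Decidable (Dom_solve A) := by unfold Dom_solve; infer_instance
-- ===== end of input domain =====

-- B replaces A's single pass (running A-count, mod at every 'G') by a two-pass
-- decomposition: build the prefix-A-count list, then sum it at 'G' positions, one final mod.

-- ===== PORT A =====
def solve (A : List String) : Int :=
  let s := A.foldl (fun (st : Int × Int) i =>
    let countA := if i == "A" then st.2 + 1 else st.2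
    let total := if i == "G" then (st.1 + countA) % 1000000007 else st.1
    (total, countA)) (0, 0)
  s.1 % 1000000007

-- ===== PORT B =====
def solve_alt (A : List String) : Int :=
  let pc := A.foldl (fun (st : List Int × Int) ch =>
    let c := if ch == "A" then st.2 + 1 else st.2
    (st.1 ++ [c], c)) ([], 0)
  let total := (pc.1.zip A).foldl (fun (t : Int) pch =>
    if pch.2 == "G" then t + pch.1 else t) 0
  total % 1000000007

-- ===== PRECONDITION & SPEC =====
def Spec_solve (A : List String) (out : Int) : Prop := out = solve_alt A
instance (A : List String) (out : Int) : Decidable (Spec_solve A out) := by unfold Spec_solve; infer_instance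

-- ===== CLAIM (what is proved, stated in full; the proofs are below) =====
def Claim_equal_solve : Prop := ∀ (A : List String), Dom_solve A → Spec_solve A (solve A)

-- ===== LEMMAS AND PROOFS =====

/-- The pure (mod-free) pair contribution of `l` given `c` 'A's already seen. -/
def fval : List String → Int → Int
  | [], _ => 0
  | x :: xs, c =>
    let c' := if x == "A" then c + 1 else c
    (if x == "G" then c' else 0) + fval xs c'

/-- The prefix-count list of `l` given `c` 'A's already seen. -/
def bld : List String → Int → List Int
  | [], _ => []
  | x :: xs, c =>
    let c' := if x == "A" then c + 1 else c
    c' :: bld xs c'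

theorem solveA_fold (l : List String) (t c : Int) (h0 : 0 ≤ t) (h1 : t < 1000000007) :
    (l.foldl (fun (st : Int × Int) i =>
      ((if i == "G" then (st.1 + if i == "A" then st.2 + 1 else st.2) % 1000000007 else st.1),
       (if i == "A" then st.2 + 1 else st.2))) (t, c)).1 = (t + fval l c) % 1000000007 := by
  induction l generalizing t c with
  | nil => simp [fval, Int.emod_eq_of_lt h0 h1]
  | cons x xs ih =>
    simp only [List.foldl_cons, fval]
    by_cases hG : x == "G"
    · have hm0 : (0:Int) < 1000000007 := by norm_num
      rw [if_pos hG, if_pos hG]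
      rw [ih _ _ (Int.emod_nonneg _ (by norm_num)) (Int.emod_lt_of_pos _ hm0)]
      rw [Int.emod_add_emod]
      ring_nf
    · rw [if_neg hG, if_neg hG]
      rw [ih _ _ h0 h1]
      ring_nf

theorem solveB_fold (l : List String) (pr : List Int) (c : Int) :
    (l.foldl (fun (st : List Int × Int) ch =>
      ((st.1 ++ [if ch == "A" then st.2 + 1 else st.2]),
       (if ch == "A" then st.2 + 1 else st.2))) (pr, c)).1 = pr ++ bld l c := by
  induction l generalizing pr c with
  | nil => simp [bld]
  | cons x xs ih =>
    simp only [List.foldl_cons, bld]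
    rw [ih]
    simp

theorem sumZip (l : List String) (c t : Int) :
    ((bld l c).zip l).foldl (fun (t : Int) pch =>
      if pch.2 == "G" then t + pch.1 else t) t = t + fval l c := by
  induction l generalizing c t with
  | nil => simp [bld, fval]
  | cons x xs ih =>
    simp only [bld, fval, List.zip_cons_cons, List.foldl_cons]
    by_cases hG : x == "G"
    · rw [if_pos hG, if_pos hG, ih]; ring
    · rw [if_neg hG, if_neg hG, ih]; ring

-- ===== VERDICT (by name: the statement is the Claim_ definition above) =====
theorem solve_spec : Claim_equal_solve := by
  intro A _
  show solve A = solve_alt A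
  unfold solve solve_alt
  simp only []
  rw [solveA_fold A 0 0 (by norm_num) (by norm_num)]
  rw [solveB_fold A [] 0, List.nil_append, sumZip A 0 0]
  simp
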